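-- pv_equiv track=rewrite | github.com/dreamframellc-cloud/DreamFrame-LLC-website | content_safety_system.py | get_content_policy_message
-- ===== SOURCE A (Python) =====
-- from typing import Dict, List, Tuple, Optional
--
-- def get_content_policy_message(violations: List[str]) -> str:
--     """Generate user-friendly policy violation message"""
--
--     if any("Celebrity" in v for v in violations):
--         return "We don't create videos featuring real people or celebrities to protect privacy and prevent misuse. Try describing a general scene or character instead."
--
--     if any("Harmful content" in v for v in violations):
--         return "We maintain family-friendly content standards. Please revise your request to focus on positive, safe themes."
--
--     if any("Copyrighted" in v for v in violations):
--         return "We respect intellectual property rights. Please create original content rather than using copyrighted characters or brands."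
--
--     return "Your request doesn't meet our content guidelines. Please try a different creative concept."
-- ===== SOURCE B (Python) =====
-- def get_content_policy_message(violations):
--     """Generate user-friendly policy violation message.
--
--     Single pass: collect every matched category into a set, then pick the
--     message in fixed priority order Celebrity > Harmful content > Copyrighted.
--     """
--     cats = set()
--     for v in violations:
--         if "Celebrity" in v:
--             cats.add("Celebrity")
--         if "Harmful content" in v:
--             cats.add("Harmful content")
--         if "Copyrighted" in v:
--             cats.add("Copyrighted")
--
--     if "Celebrity" in cats:
--         return "We don't create videos featuring real people or celebrities to protect privacy and prevent misuse. Try describing a general scene or character instead."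
--     if "Harmful content" in cats:
--         return "We maintain family-friendly content standards. Please revise your request to focus on positive, safe themes."
--     if "Copyrighted" in cats:
--         return "We respect intellectual property rights. Please create original content rather than using copyrighted characters or brands."
--     return "Your request doesn't meet our content guidelines. Please try a different creative concept."
-- ===== Notes on version B (the rewrite author's own statement) =====
-- stated objective: alternative
-- what changed: Three priority-ordered any(...) scans over the list are replaced by one collect pass that records every matched category in a set, followed by a priority lookup in that set.
import Mathlib
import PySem

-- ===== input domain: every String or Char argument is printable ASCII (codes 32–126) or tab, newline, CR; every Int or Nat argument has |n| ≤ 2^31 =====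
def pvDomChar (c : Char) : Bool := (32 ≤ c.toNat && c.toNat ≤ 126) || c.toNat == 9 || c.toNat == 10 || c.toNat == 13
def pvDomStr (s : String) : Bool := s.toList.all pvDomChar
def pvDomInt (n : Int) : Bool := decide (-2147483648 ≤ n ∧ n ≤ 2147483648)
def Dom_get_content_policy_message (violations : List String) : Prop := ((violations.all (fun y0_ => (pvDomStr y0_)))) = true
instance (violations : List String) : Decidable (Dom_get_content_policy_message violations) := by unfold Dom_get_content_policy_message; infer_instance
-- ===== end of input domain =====

-- B replaces A's three priority-ordered any(...) scans by one collect pass into a set plus a priority lookup (alternative decomposition).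

-- ===== PORT A =====
def get_content_policy_message (violations : List String) : String :=
  if violations.any (fun v => PySem.Str.isIn "Celebrity" v) then
    "We don't create videos featuring real people or celebrities to protect privacy and prevent misuse. Try describing a general scene or character instead."
  else if violations.any (fun v => PySem.Str.isIn "Harmful content" v) then
    "We maintain family-friendly content standards. Please revise your request to focus on positive, safe themes."
  else if violations.any (fun v => PySem.Str.isIn "Copyrighted" v) then
    "We respect intellectual property rights. Please create original content rather than using copyrighted characters or brands."
  else
    "Your request doesn't meet our content guidelines. Please try a different creative concept."

-- ===== PORT B =====
-- one loop iteration of Source B: add each matched category to the set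
def pvCollectStep (s : PySem.Set String) (v : String) : PySem.Set String :=
  let s1 := if PySem.Str.isIn "Celebrity" v then PySem.Set.add s "Celebrity" else s
  let s2 := if PySem.Str.isIn "Harmful content" v then PySem.Set.add s1 "Harmful content" else s1
  if PySem.Str.isIn "Copyrighted" v then PySem.Set.add s2 "Copyrighted" else s2

def get_content_policy_message_alt (violations : List String) : String :=
  let cats := violations.foldl pvCollectStep PySem.Set.empty
  if PySem.Set.contains cats "Celebrity" then
    "We don't create videos featuring real people or celebrities to protect privacy and prevent misuse. Try describing a general scene or character instead."
  else if PySem.Set.contains cats "Harmful content" then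
    "We maintain family-friendly content standards. Please revise your request to focus on positive, safe themes."
  else if PySem.Set.contains cats "Copyrighted" then
    "We respect intellectual property rights. Please create original content rather than using copyrighted characters or brands."
  else
    "Your request doesn't meet our content guidelines. Please try a different creative concept."

-- ===== PRECONDITION & SPEC =====
def Spec_get_content_policy_message (violations : List String) (out : String) : Prop := out = get_content_policy_message_alt violations
instance (violations : List String) (out : String) : Decidable (Spec_get_content_policy_message violations out) := by unfold Spec_get_content_policy_message; infer_instance

-- ===== CLAIM (what is proved, stated in full; the proofs are below) =====
def Claim_equal_get_content_policy_message : Prop := ∀ (violations : List String), Dom_get_content_policy_message violations → Spec_get_content_policy_message violations (get_content_policy_message violations)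

-- ===== LEMMAS AND PROOFS =====

theorem pv_mem_condAdd {p : Prop} [Decidable p] (t : PySem.Set String) (x y : String) :
    (y ∈ (if p then PySem.Set.add t x else t)) ↔ (y ∈ t ∨ (p ∧ y = x)) := by
  split_ifs with h <;> simp [PySem.Set.mem_add, h]

theorem pv_step_mem (s : PySem.Set String) (v k : String)
    (hk : k = "Celebrity" ∨ k = "Harmful content" ∨ k = "Copyrighted") :
    (k ∈ pvCollectStep s v) ↔ (k ∈ s ∨ PySem.Str.isIn k v = true) := by
  have d1 : ("Celebrity" : String) ≠ "Harmful content" := by decide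
  have d2 : ("Celebrity" : String) ≠ "Copyrighted" := by decide
  have d3 : ("Harmful content" : String) ≠ "Copyrighted" := by decide
  rcases hk with rfl | rfl | rfl <;>
    (simp only [pvCollectStep, pv_mem_condAdd]; tauto)

theorem pv_fold_mem (l : List String) (s : PySem.Set String) (k : String)
    (hk : k = "Celebrity" ∨ k = "Harmful content" ∨ k = "Copyrighted") :
    (k ∈ l.foldl pvCollectStep s) ↔ (k ∈ s ∨ l.any (fun v => PySem.Str.isIn k v) = true) := by
  induction l generalizing s with
  | nil => simp
  | cons v t ih =>
      simp only [List.foldl_cons, List.any_cons, ih _, pv_step_mem _ _ _ hk, Bool.or_eq_true]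
      tauto

-- ===== VERDICT (by name: the statement is the Claim_ definition above) =====
theorem get_content_policy_message_spec : Claim_equal_get_content_policy_message := by
  intro violations _
  unfold Spec_get_content_policy_message get_content_policy_message get_content_policy_message_alt
  have h1 := pv_fold_mem violations PySem.Set.empty "Celebrity" (Or.inl rfl)
  have h2 := pv_fold_mem violations PySem.Set.empty "Harmful content" (Or.inr (Or.inl rfl))
  have h3 := pv_fold_mem violations PySem.Set.empty "Copyrighted" (Or.inr (Or.inr rfl))
  simp only [PySem.Set.empty, List.not_mem_nil, false_or] at h1 h2 h3
  simp only [PySem.Set.contains, List.contains_iff_mem, PySem.Set.empty, h1, h2, h3]
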